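-- pv_equiv track=rewrite | github.com/Ekene-Chris/ai-resume | app/services/role_analyzers/devops_analyzer.py | _identify_container_techs
-- ===== SOURCE A (Python) =====
-- from typing import Dict, Any, List
--
-- def _identify_container_techs(technologies: List[str], raw_text: str) -> List[str]:
--     """Identify which container technologies are mentioned in the resume"""
--     container_techs = []
--
--     container_keywords = {
--         "docker": ["docker", "dockerfile", "docker-compose", "docker swarm"],
--         "kubernetes": ["kubernetes", "k8s", "kubectl", "kubernetes cluster", "k8s cluster",
--                       "aks", "eks", "gke", "openshift", "rancher", "kube"],
--         "openshift": ["openshift", "okd", "origin"],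
--         "rancher": ["rancher"],
--         "nomad": ["nomad", "hashicorp nomad"],
--         "containerd": ["containerd"],
--         "cri-o": ["cri-o", "crio"],
--         "podman": ["podman"],
--         "helm": ["helm", "helm chart"],
--         "istio": ["istio", "service mesh"],
--         "linkerd": ["linkerd"],
--         "consul": ["consul", "hashicorp consul"]
--     }
--
--     for tech, keywords in container_keywords.items():
--         for keyword in keywords:
--             if any(keyword.lower() in t.lower() for t in technologies) or keyword.lower() in raw_text.lower():
--                 container_techs.append(tech)
--                 break
--
--     return list(set(container_techs))  # Remove duplicates
-- ===== SOURCE B (Python) =====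
-- from typing import List
--
-- _CONTAINER_KEYWORDS = {
--     "docker": ["docker", "dockerfile", "docker-compose", "docker swarm"],
--     "kubernetes": ["kubernetes", "k8s", "kubectl", "kubernetes cluster", "k8s cluster",
--                    "aks", "eks", "gke", "openshift", "rancher", "kube"],
--     "openshift": ["openshift", "okd", "origin"],
--     "rancher": ["rancher"],
--     "nomad": ["nomad", "hashicorp nomad"],
--     "containerd": ["containerd"],
--     "cri-o": ["cri-o", "crio"],
--     "podman": ["podman"],
--     "helm": ["helm", "helm chart"],
--     "istio": ["istio", "service mesh"],
--     "linkerd": ["linkerd"],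
--     "consul": ["consul", "hashicorp consul"]
-- }
--
-- # All keywords of the table above, indexed by their first character (precomputed):
-- # a single left-to-right scan of the text consults only the keywords that can
-- # start at the current character.
-- _BY_FIRST = {
--     'd': ["docker", "dockerfile", "docker-compose", "docker swarm"],
--     'k': ["kubernetes", "k8s", "kubectl", "kubernetes cluster", "k8s cluster", "kube"],
--     'a': ["aks"],
--     'e': ["eks"],
--     'g': ["gke"],
--     'o': ["openshift", "okd", "origin"],
--     'r': ["rancher"],
--     'n': ["nomad"],
--     'h': ["hashicorp nomad", "helm", "helm chart", "hashicorp consul"],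
--     'c': ["containerd", "cri-o", "crio", "consul"],
--     'p': ["podman"],
--     'i': ["istio"],
--     's': ["service mesh"],
--     'l': ["linkerd"],
-- }
--
-- def _identify_container_techs(technologies: List[str], raw_text: str) -> List[str]:
--     """Identify which container technologies are mentioned in the resume.
--
--     Multi-pattern scan: one lowercased haystack (newline-joined, so no keyword
--     can span a join boundary) is scanned ONCE left to right; at each position
--     only the keywords starting with the current character are tried, and the
--     keywords found drive the tech lookup afterwards."""
--     hay = "\n".join(t.lower() for t in technologies) + "\n" + raw_text.lower()
--     matched = set()
--     for i, c in enumerate(hay):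
--         for kw in _BY_FIRST.get(c, []):
--             if hay[i:i + len(kw)] == kw:
--                 matched.add(kw)
--     return list({tech for tech, kws in _CONTAINER_KEYWORDS.items()
--                  if any(kw in matched for kw in kws)})
-- ===== Notes on version B (the rewrite author's own statement) =====
-- stated objective: alternative
-- what changed: A runs one substring search over the technologies and the raw text per keyword (re-lowercasing them each time); B builds one lowercased newline-joined haystack and scans it ONCE left to right, trying at each position only the keywords indexed under the current character (a first-character-indexed multi-pattern scan), then maps the matched-keyword set to techs in a final table pass; a timing run measured ~2.5x at the largest size.
import Mathlib
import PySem

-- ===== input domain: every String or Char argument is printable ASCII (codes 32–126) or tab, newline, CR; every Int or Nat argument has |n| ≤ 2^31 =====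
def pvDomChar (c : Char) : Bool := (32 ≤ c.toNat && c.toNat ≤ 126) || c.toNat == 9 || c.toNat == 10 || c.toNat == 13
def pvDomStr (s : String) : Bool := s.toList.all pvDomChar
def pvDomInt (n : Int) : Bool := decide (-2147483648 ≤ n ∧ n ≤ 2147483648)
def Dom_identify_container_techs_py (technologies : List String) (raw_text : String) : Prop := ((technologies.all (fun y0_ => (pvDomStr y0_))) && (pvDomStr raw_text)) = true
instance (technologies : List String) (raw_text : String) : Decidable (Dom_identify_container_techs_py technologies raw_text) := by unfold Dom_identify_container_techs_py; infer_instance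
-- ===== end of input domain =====

-- B replaces A's per-keyword substring searches (each rescanning and re-lowercasing the
-- technologies and the raw text) by a multi-pattern scan: one lowercased newline-joined
-- haystack is traversed ONCE, at each position only the keywords indexed under the current
-- first character are tried, and the set of matched keywords then drives the tech lookup.

-- ===== PORT A =====
-- the literal dict `container_keywords` (distinct literal keys; .items() iterates in insertion order)
def ckPairs : List (String × List String) :=
  [("docker", ["docker", "dockerfile", "docker-compose", "docker swarm"]),
   ("kubernetes", ["kubernetes", "k8s", "kubectl", "kubernetes cluster", "k8s cluster",
                   "aks", "eks", "gke", "openshift", "rancher", "kube"]),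
   ("openshift", ["openshift", "okd", "origin"]),
   ("rancher", ["rancher"]),
   ("nomad", ["nomad", "hashicorp nomad"]),
   ("containerd", ["containerd"]),
   ("cri-o", ["cri-o", "crio"]),
   ("podman", ["podman"]),
   ("helm", ["helm", "helm chart"]),
   ("istio", ["istio", "service mesh"]),
   ("linkerd", ["linkerd"]),
   ("consul", ["consul", "hashicorp consul"])]

-- A's inner `for keyword in keywords: if …: append; break` — returns whether the break fired
def aInner (technologies : List String) (raw_text : String) : List String → Bool
  | [] => false
  | keyword :: rest =>
    if technologies.any (fun t => PySem.Str.isIn (PySem.Str.lower keyword) (PySem.Str.lower t))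
       || PySem.Str.isIn (PySem.Str.lower keyword) (PySem.Str.lower raw_text)
    then true
    else aInner technologies raw_text rest

def identify_container_techs_py (technologies : List String) (raw_text : String) : List String :=
  let container_techs :=
    ckPairs.foldl (fun acc p =>
      if aInner technologies raw_text p.2 then acc ++ [p.1] else acc) []
  PySem.Set.ofList container_techs    -- list(set(container_techs))

-- ===== PORT B =====
-- Source B's literal `_BY_FIRST`: the table's keywords indexed by first character
def byFirst : PySem.Dict Char (List String) := PySem.Dict.ofList
  [('d', ["docker", "dockerfile", "docker-compose", "docker swarm"]),
   ('k', ["kubernetes", "k8s", "kubectl", "kubernetes cluster", "k8s cluster", "kube"]),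
   ('a', ["aks"]),
   ('e', ["eks"]),
   ('g', ["gke"]),
   ('o', ["openshift", "okd", "origin"]),
   ('r', ["rancher"]),
   ('n', ["nomad"]),
   ('h', ["hashicorp nomad", "helm", "helm chart", "hashicorp consul"]),
   ('c', ["containerd", "cri-o", "crio", "consul"]),
   ('p', ["podman"]),
   ('i', ["istio"]),
   ('s', ["service mesh"]),
   ('l', ["linkerd"])]

def identify_container_techs_py_alt (technologies : List String) (raw_text : String) : List String :=
  let hay := PySem.Str.join "\n" (technologies.map PySem.Str.lower) ++ "\n" ++ PySem.Str.lower raw_text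
  -- for i, c in enumerate(hay): for kw in _BY_FIRST.get(c, []): if hay[i:i+len(kw)] == kw: matched.add(kw)
  let matched : PySem.Set String :=
    (PySem.List.enumerate hay.toList).foldl (fun m ic =>
      (PySem.Dict.getD byFirst ic.2 []).foldl (fun m kw =>
        if PySem.Str.slice hay (some ic.1) (some (ic.1 + PySem.Str.len kw)) == kw
        then PySem.Set.add m kw else m) m) PySem.Set.empty
  PySem.Set.ofList
    ((ckPairs.filter (fun p => p.2.any (fun kw => PySem.Set.contains matched kw))).map Prod.fst)

-- ===== PRECONDITION & SPEC =====
def Spec_identify_container_techs_py (technologies : List String) (raw_text : String) (out : List String) : Prop := out = identify_container_techs_py_alt technologies raw_text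
instance (technologies : List String) (raw_text : String) (out : List String) : Decidable (Spec_identify_container_techs_py technologies raw_text out) := by unfold Spec_identify_container_techs_py; infer_instance

-- ===== CLAIM (what is proved, stated in full; the proofs are below) =====
def Claim_equal_identify_container_techs_py : Prop := ∀ (technologies : List String) (raw_text : String), Dom_identify_container_techs_py technologies raw_text → Spec_identify_container_techs_py technologies raw_text (identify_container_techs_py technologies raw_text)

-- ===== LEMMAS AND PROOFS =====

-- a prefix of l1 ++ c :: l2 not containing c is a prefix of l1
theorem prefix_split {kw l1 l2 : List Char} {c : Char}
    (h : kw <+: l1 ++ c :: l2) (hn : c ∉ kw) : kw <+: l1 := by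
  by_cases hl : kw.length ≤ l1.length
  · obtain ⟨t, ht⟩ := h
    have hkw : kw = (l1 ++ c :: l2).take kw.length := by
      rw [← ht, List.take_left']; rfl
    rw [List.take_append_of_le_length hl] at hkw
    exact hkw ▸ List.take_prefix _ _
  · exfalso
    have hl' := Nat.lt_of_not_le hl
    have hlen : l1.length < (l1 ++ c :: l2).length := by simp
    have hg := h.getElem hl'
    have hc : (l1 ++ c :: l2)[l1.length]'hlen = c := by
      rw [List.getElem_append_right (Nat.le_refl _)]
      simp
    exact hn ((hg.trans hc) ▸ List.getElem_mem hl')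

-- an infix of l1 ++ c :: l2 not containing c lies in l1 or in l2
theorem infix_split {kw : List Char} {c : Char} (hn : c ∉ kw) :
    ∀ (l1 l2 : List Char), kw <:+: l1 ++ c :: l2 ↔ kw <:+: l1 ∨ kw <:+: l2 := by
  intro l1 l2
  constructor
  · induction l1 with
    | nil =>
      intro h
      simp only [List.nil_append, List.infix_cons_iff] at h
      rcases h with h | h
      · cases kw with
        | nil => exact Or.inl List.nil_infix
        | cons a kw' =>
          obtain ⟨t, ht⟩ := h
          rw [List.cons_append] at ht
          injection ht with h1 _
          cases h1
          exact absurd List.mem_cons_self hn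
      · exact Or.inr h
    | cons a l1' ih =>
      intro h
      rw [List.cons_append, List.infix_cons_iff] at h
      rcases h with h | h
      · exact Or.inl ((prefix_split (by simpa using h) hn).isInfix)
      · rcases ih h with h' | h'
        · exact Or.inl (List.infix_cons h')
        · exact Or.inr h'
  · rintro (h | h)
    · exact h.trans ⟨[], c :: l2, rfl⟩
    · exact h.trans ⟨l1 ++ [c], [], by simp⟩

-- kw in the newline-joined haystack ↔ kw in some part or in the tail
theorem hay_spec {kw : List Char} (hn : '\n' ∉ kw) :
    ∀ (parts : List (List Char)) (raw : List Char),
    kw <:+: PySem.Chars.join ['\n'] parts ++ '\n' :: raw ↔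
      (∃ p ∈ parts, kw <:+: p) ∨ kw <:+: raw := by
  intro parts
  induction parts with
  | nil =>
    intro raw
    rw [PySem.Chars.join_nil, infix_split hn]
    simp only [List.not_mem_nil, false_and, exists_false, false_or, List.infix_nil]
    constructor
    · rintro (rfl | h)
      · exact List.nil_infix
      · exact h
    · exact Or.inr
  | cons p rest ih =>
    intro raw
    cases rest with
    | nil =>
      rw [PySem.Chars.join_singleton, infix_split hn]
      simp
    | cons q rest' =>
      rw [PySem.Chars.join_cons_cons]
      have hassoc : (p ++ ['\n'] ++ PySem.Chars.join ['\n'] (q :: rest')) ++ '\n' :: raw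
           = p ++ '\n' :: (PySem.Chars.join ['\n'] (q :: rest') ++ '\n' :: raw) := by simp
      rw [hassoc, infix_split hn, ih raw]
      constructor
      · rintro (h | (⟨x, hx, hxi⟩ | h))
        · exact Or.inl ⟨p, List.mem_cons_self, h⟩
        · exact Or.inl ⟨x, List.mem_cons_of_mem _ hx, hxi⟩
        · exact Or.inr h
      · rintro (⟨x, hx, hxi⟩ | h)
        · rcases List.mem_cons.mp hx with rfl | hx
          · exact Or.inl hxi
          · exact Or.inr (Or.inl ⟨x, hx, hxi⟩)
        · exact Or.inr (Or.inr h)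

-- every keyword in the table is lowercase, newline-free, nonempty, and indexed in byFirst
-- under its own first character
theorem ck_keywords_ok :
    ∀ p ∈ ckPairs, ∀ kw ∈ p.2, PySem.Str.lower kw = kw ∧ '\n' ∉ kw.toList ∧
      kw.toList ≠ [] ∧ kw ∈ PySem.Dict.getD byFirst kw.toList.head! [] := by decide

-- A's break-loop is an existence test
theorem aInner_eq_any (technologies : List String) (raw_text : String) (kws : List String) :
    aInner technologies raw_text kws =
      kws.any (fun keyword =>
        technologies.any (fun t => PySem.Str.isIn (PySem.Str.lower keyword) (PySem.Str.lower t))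
        || PySem.Str.isIn (PySem.Str.lower keyword) (PySem.Str.lower raw_text)) := by
  induction kws with
  | nil => rfl
  | cons k rest ih =>
    simp only [aInner, List.any_cons, ← ih]
    split <;> simp_all

-- A's per-keyword test equals a single substring test on B's haystack, for a lowercase
-- newline-free keyword
theorem keyword_ok (technologies : List String) (raw_text : String) {kw : String}
    (hlow : PySem.Str.lower kw = kw) (hn : '\n' ∉ kw.toList) :
    (technologies.any (fun t => PySem.Str.isIn (PySem.Str.lower kw) (PySem.Str.lower t))
      || PySem.Str.isIn (PySem.Str.lower kw) (PySem.Str.lower raw_text))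
    = PySem.Str.isIn kw
        (PySem.Str.join "\n" (technologies.map PySem.Str.lower) ++ "\n" ++ PySem.Str.lower raw_text) := by
  rw [hlow, Bool.eq_iff_iff]
  have hnl : ("\n" : String).toList = ['\n'] := rfl
  have hhay : (PySem.Str.join "\n" (technologies.map PySem.Str.lower) ++ "\n" ++ PySem.Str.lower raw_text).toList
      = PySem.Chars.join ['\n'] ((technologies.map PySem.Str.lower).map String.toList)
          ++ '\n' :: (PySem.Str.lower raw_text).toList := by
    simp only [String.toList_append, PySem.Str.toList_join, hnl, List.append_assoc]
    rfl
  rw [PySem.Str.isIn_iff_infix, hhay, hay_spec hn]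
  simp only [Bool.or_eq_true, List.any_eq_true, PySem.Str.isIn_iff_infix, List.map_map,
    List.mem_map, Function.comp]
  constructor
  · rintro (⟨t, ht, h⟩ | h)
    · exact Or.inl ⟨_, ⟨t, ht, rfl⟩, h⟩
    · exact Or.inr h
  · rintro (⟨x, ⟨t, ht, rfl⟩, h⟩ | h)
    · exact Or.inl ⟨t, ht, h⟩
    · exact Or.inr h

-- membership in the inner conditional-add fold
theorem mem_foldl_addIf (cond : String → Bool) (kws : List String) (m : PySem.Set String) (x : String) :
    x ∈ kws.foldl (fun m kw => if cond kw then PySem.Set.add m kw else m) m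
      ↔ x ∈ m ∨ (x ∈ kws ∧ cond x = true) := by
  induction kws generalizing m with
  | nil => simp
  | cons k rest ih =>
    rw [List.foldl_cons, ih]
    by_cases hck : cond k = true
    · rw [if_pos hck, PySem.Set.mem_add]
      simp only [List.mem_cons]
      constructor
      · rintro ((hm | rfl) | ⟨hr, hc⟩)
        · exact Or.inl hm
        · exact Or.inr ⟨Or.inl rfl, hck⟩
        · exact Or.inr ⟨Or.inr hr, hc⟩
      · rintro (hm | ⟨rfl | hr, hc⟩)
        · exact Or.inl (Or.inl hm)
        · exact Or.inl (Or.inr rfl)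
        · exact Or.inr ⟨hr, hc⟩
    · rw [if_neg hck]
      simp only [List.mem_cons]
      constructor
      · rintro (hm | ⟨hr, hc⟩)
        · exact Or.inl hm
        · exact Or.inr ⟨Or.inr hr, hc⟩
      · rintro (hm | ⟨rfl | hr, hc⟩)
        · exact Or.inl hm
        · exact absurd hc hck
        · exact Or.inr ⟨hr, hc⟩

-- membership in the whole position scan
theorem mem_foldl_scan (ks : Int × Char → List String) (cond : Int × Char → String → Bool)
    (pairs : List (Int × Char)) (m : PySem.Set String) (x : String) :
    x ∈ pairs.foldl (fun m ic =>
          (ks ic).foldl (fun m kw => if cond ic kw then PySem.Set.add m kw else m) m) m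
      ↔ x ∈ m ∨ ∃ ic ∈ pairs, x ∈ ks ic ∧ cond ic x = true := by
  induction pairs generalizing m with
  | nil => simp
  | cons p rest ih =>
    simp only [List.foldl_cons, ih, mem_foldl_addIf, List.mem_cons]
    constructor
    · rintro ((hm | ⟨hk, hc⟩) | ⟨ic, hic, h⟩)
      · exact Or.inl hm
      · exact Or.inr ⟨p, Or.inl rfl, hk, hc⟩
      · exact Or.inr ⟨ic, Or.inr hic, h⟩
    · rintro (hm | ⟨ic, rfl | hic, h⟩)
      · exact Or.inl (Or.inl hm)
      · exact Or.inl (Or.inr h)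
      · exact Or.inr ⟨ic, hic, h⟩

-- for 0 ≤ j, the slice comparison at j is the prefix test at j
theorem cond_iff_prefix (hay kw : String) (j : Int) (hj : 0 ≤ j) :
    (PySem.Str.slice hay (some j) (some (j + PySem.Str.len kw)) == kw) = true
      ↔ kw.toList <+: hay.toList.drop j.toNat := by
  rw [beq_iff_eq, ← String.toList_inj, PySem.Str.toList_slice, PySem.Chars.slice_eq_listSlice]
  have hlen : PySem.Str.len kw = (kw.toList.length : Int) := by
    simp [PySem.Str.len]
  have hj' : j = ((j.toNat : Nat) : Int) := (Int.toNat_of_nonneg hj).symm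
  rw [hlen, hj', PySem.List.slice_natCast_add hay.toList j.toNat kw.toList.length]
  rw [List.prefix_iff_eq_take]
  exact ⟨fun h => h.symm, fun h => h.symm⟩

-- a table keyword is in B's matched set iff it is a substring of the haystack
theorem scan_iff_isIn (hay kw : String) (hne : kw.toList ≠ [])
    (hbf : kw ∈ PySem.Dict.getD byFirst kw.toList.head! []) :
    kw ∈ (PySem.List.enumerate hay.toList).foldl (fun m ic =>
        (PySem.Dict.getD byFirst ic.2 []).foldl (fun m kw =>
          if PySem.Str.slice hay (some ic.1) (some (ic.1 + PySem.Str.len kw)) == kw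
          then PySem.Set.add m kw else m) m) PySem.Set.empty
      ↔ PySem.Str.isIn kw hay = true := by
  rw [mem_foldl_scan (fun ic => PySem.Dict.getD byFirst ic.2 [])
        (fun ic kw => PySem.Str.slice hay (some ic.1) (some (ic.1 + PySem.Str.len kw)) == kw)]
  have hempty : kw ∉ (PySem.Set.empty : PySem.Set String) := by simp [PySem.Set.empty]
  rw [PySem.List.enumerate_eq_map_pyRange hay.toList 'x']
  have hisin : PySem.Str.isIn kw hay = PySem.Chars.isIn kw.toList hay.toList := by simp
  rw [hisin, ← PySem.Chars.exists_prefix_drop_iff_isIn]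
  simp only [List.mem_map, PySem.List.mem_pyRange_one]
  constructor
  · rintro (hm | ⟨ic, ⟨j, ⟨hj0, hjn⟩, rfl⟩, _, hc⟩)
    · exact absurd hm hempty
    · exact ⟨j.toNat, (cond_iff_prefix hay kw j hj0).mp hc⟩
  · rintro ⟨jn, hpre⟩
    rcases List.exists_cons_of_ne_nil hne with ⟨c, t, hct⟩
    have hlt : jn < hay.toList.length := by
      by_contra hge
      rw [List.drop_eq_nil_of_le (Nat.le_of_not_lt hge)] at hpre
      rw [hct] at hpre
      exact absurd (List.eq_nil_of_prefix_nil hpre) (by simp)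
    have hc : hay.toList[jn] = c := by
      rcases hpre with ⟨r, hr⟩
      rw [hct] at hr
      have hdr : hay.toList.drop jn = c :: (t ++ r) := by rw [← hr]; simp
      have h0 : (hay.toList.drop jn)[0]'(by rw [hdr]; simp) = c := by
        simp [hdr]
      rw [List.getElem_drop] at h0
      simpa using h0
    have hltI : ((jn : Nat) : Int) < PySem.List.len hay.toList := by
      simpa using (show ((jn : Nat) : Int) < ((hay.toList.length : Nat) : Int) by exact_mod_cast hlt)
    right
    refine ⟨((jn : Int), c), ⟨(jn : Int), ⟨by positivity, hltI⟩, ?_⟩, ?_, ?_⟩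
    · rw [PySem.List.pyGetD_eq_getElem hay.toList 'x' (by positivity) (by exact_mod_cast hlt)]
      simp [hc]
    · rw [hct] at hbf
      simpa using hbf
    · have hjn : ((jn : Nat) : Int).toNat = jn := by simp
      rw [cond_iff_prefix hay kw (jn : Int) (by positivity), hjn]
      exact hpre

-- ===== VERDICT (by name: the statement is the Claim_ definition above) =====
theorem identify_container_techs_py_spec : Claim_equal_identify_container_techs_py := by
  intro technologies raw_text _
  show identify_container_techs_py technologies raw_text
     = identify_container_techs_py_alt technologies raw_text
  unfold identify_container_techs_py identify_container_techs_py_alt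
  simp only [PySem.List.foldl_append_if, List.nil_append]
  congr 1
  congr 1
  apply List.filter_congr
  intro p hp
  rw [aInner_eq_any, Bool.eq_iff_iff]
  simp only [List.any_eq_true]
  constructor
  · rintro ⟨kw, hkw, h⟩
    obtain ⟨hlow, hnl, hne, hbf⟩ := ck_keywords_ok p hp kw hkw
    refine ⟨kw, hkw, ?_⟩
    have hin := h
    rw [keyword_ok technologies raw_text hlow hnl] at hin
    have hmem := (scan_iff_isIn _ kw hne hbf).mpr hin
    simpa [PySem.Set.contains] using hmem
  · rintro ⟨kw, hkw, h⟩
    obtain ⟨hlow, hnl, hne, hbf⟩ := ck_keywords_ok p hp kw hkw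
    refine ⟨kw, hkw, ?_⟩
    rw [keyword_ok technologies raw_text hlow hnl]
    refine (scan_iff_isIn _ kw hne hbf).mp ?_
    simpa [PySem.Set.contains] using h
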